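-- pv_equiv track=rewrite | github.com/Mazen1004/LeetCode-Projects | 2469-longest-subsequence-with-limited-sum/2469-longest-subsequence-with-limited-sum.py | answerQueries
-- ===== SOURCE A (Python) =====
-- from typing import List
--
-- def answerQueries(nums: List[int], queries: List[int]) -> List[int]:
--     ans = []
--     nums.sort()
--
--     prefix = [nums[0]]
--     for i in range(1, len(nums)):
--         prefix.append(nums[i] + prefix[-1])
--
--     for query in queries:
--         #Binary search for each value in query
--         left = 0
--         right = len(prefix) - 1
--
--         while left <= right:
--             mid = (left + right) // 2
--
--
--             if prefix[mid] <= query: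
--                 left = mid + 1
--             else:
--                 right = mid - 1
--
--         ans.append(left)
--
--     return ans
-- ===== SOURCE B (Python) =====
-- def answerQueries(nums, queries):
--     # Same in-place sort; prefix built with a running total (no negative indexing);
--     # per-query search done by structural recursion on list slices instead of an
--     # index-pair while loop; answers collected by a comprehension.
--     nums.sort()
--     prefix = []
--     total = 0
--     for v in nums:
--         total += v
--         prefix.append(total)
--
--     def fit(seg, base, q):
--         if not seg:
--             return base
--         mid = (len(seg) - 1) // 2
--         if seg[mid] <= q:
--             return fit(seg[mid + 1:], base + mid + 1, q)
--         return fit(seg[:mid], base, q)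
--
--     return [fit(prefix, 0, q) for q in queries]
-- ===== Notes on version B (the rewrite author's own statement) =====
-- stated objective: alternative
-- what changed: Same task, re-decomposed throughout: the prefix array is built with a running total instead of prefix[-1] indexing, each query is answered by structural recursion on list slices carrying a base offset instead of A's left/right-index while loop, and the answers are collected by a comprehension instead of an accumulator list.
import Mathlib
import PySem

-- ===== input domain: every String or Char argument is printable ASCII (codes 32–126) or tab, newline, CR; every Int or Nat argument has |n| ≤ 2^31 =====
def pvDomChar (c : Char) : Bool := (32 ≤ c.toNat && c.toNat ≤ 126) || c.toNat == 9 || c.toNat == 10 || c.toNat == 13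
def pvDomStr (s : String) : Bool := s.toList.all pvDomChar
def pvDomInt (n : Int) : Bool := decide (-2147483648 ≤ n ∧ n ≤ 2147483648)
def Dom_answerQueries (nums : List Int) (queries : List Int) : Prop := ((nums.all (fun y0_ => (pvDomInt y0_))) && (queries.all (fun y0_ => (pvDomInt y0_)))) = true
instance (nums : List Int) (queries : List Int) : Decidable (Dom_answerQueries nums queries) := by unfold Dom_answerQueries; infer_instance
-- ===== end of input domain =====

-- B re-decomposes A: running-total prefix build, recursive slice-based search instead of the
-- left/right-index while loop, comprehension instead of an accumulator (objective: alternative).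
-- Both Pythons sort nums in place; the equivalence proved is about the return value (the
-- mutation is identical in A and B).

-- ===== PORT A =====
-- A's hand-written `while left <= right` binary search. prefix[mid] is read through pyGetD with
-- default 0: on every reachable state 0 ≤ left ≤ mid ≤ right < len(prefix), so the default is
-- never consulted and the port is exact.
def pvBSearch (pre : List Int) (q : Int) (left right : Int) : Int :=
  if h : left ≤ right then
    let mid := PySem.Int.floordiv (left + right) 2
    if PySem.List.pyGetD pre mid 0 ≤ q then
      pvBSearch pre q (mid + 1) right
    else
      pvBSearch pre q left (mid - 1)
  else left
termination_by (right + 1 - left).toNat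
decreasing_by
  · have := PySem.Int.floordiv_two_mid_bounds h; omega
  · have := PySem.Int.floordiv_two_mid_bounds h; omega

-- A's prefix-building loop: 'prefix = [nums[0]]; for i in range(1, len(nums)):
-- prefix.append(nums[i] + prefix[-1])'. nums[0] is read through pyGetD: on nums = []
-- Python raises IndexError there, excluded by Pre_.
def pvPrefixA (s : List Int) : List Int :=
  (PySem.List.pyRange 1 (s.length : Int)).foldl
    (fun p i => p ++ [PySem.List.pyGetD s i 0 + PySem.List.pyGetD p (-1) 0])
    [PySem.List.pyGetD s 0 0]

def answerQueries (nums : List Int) (queries : List Int) : List Int :=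
  let s := PySem.List.sorted nums (fun x => x)
  let pre := pvPrefixA s
  queries.foldl (fun ans q => ans ++ [pvBSearch pre q 0 ((pre.length : Int) - 1)]) []

-- ===== PORT B =====
-- B's recursive helper 'fit(seg, base, q)': structural recursion on slices of the prefix list.
def pvFit (seg : List Int) (base q : Int) : Int :=
  if seg.length = 0 then base
  else
    let mid := PySem.Int.floordiv ((seg.length : Int) - 1) 2
    if PySem.List.pyGetD seg mid 0 ≤ q then
      pvFit (PySem.List.slice seg (some (mid + 1)) none) (base + mid + 1) q
    else
      pvFit (PySem.List.slice seg none (some mid)) base q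
termination_by seg.length
decreasing_by
  · rename_i hne
    have hb := PySem.Int.floordiv_two_mid_bounds
      (show (0:Int) ≤ (seg.length : Int) - 1 by omega)
    simp only [zero_add] at hb
    rw [PySem.List.slice_from _ (by omega)]
    simp only [List.length_drop]
    omega
  · rename_i hne
    have hb := PySem.Int.floordiv_two_mid_bounds
      (show (0:Int) ≤ (seg.length : Int) - 1 by omega)
    simp only [zero_add] at hb
    rw [PySem.List.slice_to _ (by omega)]
    simp only [List.length_take]
    omega

-- B: same in-place sort; prefix via a running total; answers by a comprehension.
def answerQueries_alt (nums : List Int) (queries : List Int) : List Int :=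
  let s := PySem.List.sorted nums (fun x => x)
  let pre := (s.foldl (fun st v => (st.1 ++ [st.2 + v], st.2 + v)) (([] : List Int), (0 : Int))).1
  queries.map (fun q => pvFit pre 0 q)

-- ===== PRECONDITION & SPEC =====
-- Pre_ excludes only nums = [], where A raises IndexError at nums[0].
def Pre_answerQueries (nums : List Int) (queries : List Int) : Prop := nums ≠ []
instance (nums : List Int) (queries : List Int) : Decidable (Pre_answerQueries nums queries) := by
  unfold Pre_answerQueries; infer_instance

def pvWitness_answerQueries : List Int × List Int := ([4, -2, 1], [3, -10, 0])

def Spec_answerQueries (nums : List Int) (queries : List Int) (out : List Int) : Prop :=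
  out = answerQueries_alt nums queries
instance (nums : List Int) (queries : List Int) (out : List Int) :
    Decidable (Spec_answerQueries nums queries out) := by unfold Spec_answerQueries; infer_instance

-- ===== CLAIM (what is proved, stated in full; the proofs are below) =====
def Claim_equal_answerQueries : Prop := ∀ (nums : List Int) (queries : List Int), Dom_answerQueries nums queries → Pre_answerQueries nums queries → Spec_answerQueries nums queries (answerQueries nums queries)

-- ===== LEMMAS AND PROOFS =====

-- the prefix-sum list as a structural scan (common value of both prefix-building loops)
def pvPf : Int → List Int → List Int
  | a, [] => [a]
  | a, v :: vs => a :: pvPf (v + a) vs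

lemma pvPf_foldA (vs : List Int) : ∀ (ys : List Int) (a : Int),
    vs.foldl (fun p v => p ++ [v + PySem.List.pyGetD p (-1) 0]) (ys ++ [a]) = ys ++ pvPf a vs := by
  induction vs with
  | nil => intro ys a; simp [pvPf]
  | cons v vs ih =>
      intro ys a
      simp only [List.foldl_cons, PySem.List.pyGetD_neg_one_append_singleton, pvPf]
      have := ih (ys ++ [a]) (v + a)
      simp only [List.append_assoc] at this ⊢
      rw [this]; rfl

lemma pvPrefixA_eq (n0 : Int) (rest : List Int) : pvPrefixA (n0 :: rest) = pvPf n0 rest := by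
  unfold pvPrefixA
  rw [PySem.List.foldl_pyRange_pyGetD' (n0 :: rest) 0
        (fun p v => p ++ [v + PySem.List.pyGetD p (-1) 0])
        [PySem.List.pyGetD (n0 :: rest) 0 0] (a := 1) (by norm_num)]
  simp only [PySem.List.pyGetD_zero_cons, Int.toNat_one, List.drop_succ_cons, List.drop_zero]
  have := pvPf_foldA rest [] n0
  simpa using this

lemma pvPf_foldB (vs : List Int) : ∀ (ys : List Int) (a : Int),
    vs.foldl (fun st v => (st.1 ++ [st.2 + v], st.2 + v)) (ys ++ [a], a)
      = (ys ++ pvPf a vs, a + vs.sum) := by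
  induction vs with
  | nil => intro ys a; simp [pvPf]
  | cons v vs ih =>
      intro ys a
      simp only [List.foldl_cons, pvPf]
      rw [show v + a = a + v from Int.add_comm v a]
      have := ih (ys ++ [a]) (a + v)
      simp only [List.append_assoc] at this ⊢
      rw [this]
      simp only [Prod.mk.injEq, List.singleton_append, List.sum_cons]
      exact ⟨trivial, by ring⟩

lemma pvPrefixB_eq (n0 : Int) (rest : List Int) :
    (((n0 :: rest).foldl (fun st v => (st.1 ++ [st.2 + v], st.2 + v))
        (([] : List Int), (0 : Int)))).1 = pvPf n0 rest := by
  simp only [List.foldl_cons]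
  have := pvPf_foldB rest [] (0 + n0)
  simp only [List.nil_append] at this ⊢
  rw [this, zero_add]

-- the crux: A's index-pair binary search equals B's slice recursion with a base offset
lemma pvBSearch_eq_fit (pre : List Int) (q : Int) : ∀ (l r : Int), 0 ≤ l → r < (pre.length : Int) →
    pvBSearch pre q l r = pvFit ((pre.drop l.toNat).take (r + 1 - l).toNat) l q := by
  intro l r
  fun_induction pvBSearch pre q l r with
  | case1 l r h mid hle ih =>
      intro h0 hr
      have hm := PySem.Int.floordiv_two_mid_bounds h
      have hm2 := PySem.Int.floordiv_two_mid_bounds (show (0:Int) ≤ r - l by omega)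
      simp only [zero_add] at hm2
      have hfd : mid = l + PySem.Int.floordiv (r - l) 2 := by
        show PySem.Int.floordiv (l + r) 2 = _
        simp only [PySem.Int.floordiv_eq_ediv_of_pos (show (0:Int) < 2 by norm_num)]
        omega
      set seg := (pre.drop l.toNat).take (r + 1 - l).toNat with hseg
      have slen : seg.length = (r + 1 - l).toNat := by
        rw [hseg]
        simp only [List.length_take, List.length_drop]
        omega
      rw [pvFit.eq_def]
      rw [if_neg (by omega)]
      simp only []
      have hsl : ((seg.length : Int) - 1) = r - l := by omega
      rw [hsl]
      have hget : PySem.List.pyGetD seg (PySem.Int.floordiv (r - l) 2) 0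
          = PySem.List.pyGetD pre mid 0 := by
        rw [PySem.List.pyGetD_eq_getElem seg 0 (by omega) (by omega),
            PySem.List.pyGetD_eq_getElem pre 0 (by omega) (by omega)]
        simp only [hseg, List.getElem_take, List.getElem_drop]
        congr 1
        omega
      rw [hget, if_pos hle]
      rw [PySem.List.slice_from _ (by omega)]
      have hsegeq : seg.drop (PySem.Int.floordiv (r - l) 2 + 1).toNat
          = (pre.drop (mid + 1).toNat).take (r + 1 - (mid + 1)).toNat := by
        rw [hseg, List.drop_take, List.drop_drop]
        congr 1
        · omega
        · congr 1; omega
      rw [hsegeq]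
      have hbase : l + PySem.Int.floordiv (r - l) 2 + 1 = mid + 1 := by omega
      rw [hbase]
      exact ih (by omega) hr
  | case2 l r h mid hle ih =>
      intro h0 hr
      have hm := PySem.Int.floordiv_two_mid_bounds h
      have hm2 := PySem.Int.floordiv_two_mid_bounds (show (0:Int) ≤ r - l by omega)
      simp only [zero_add] at hm2
      have hfd : mid = l + PySem.Int.floordiv (r - l) 2 := by
        show PySem.Int.floordiv (l + r) 2 = _
        simp only [PySem.Int.floordiv_eq_ediv_of_pos (show (0:Int) < 2 by norm_num)]
        omega
      set seg := (pre.drop l.toNat).take (r + 1 - l).toNat with hseg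
      have slen : seg.length = (r + 1 - l).toNat := by
        rw [hseg]
        simp only [List.length_take, List.length_drop]
        omega
      rw [pvFit.eq_def]
      rw [if_neg (by omega)]
      simp only []
      have hsl : ((seg.length : Int) - 1) = r - l := by omega
      rw [hsl]
      have hget : PySem.List.pyGetD seg (PySem.Int.floordiv (r - l) 2) 0
          = PySem.List.pyGetD pre mid 0 := by
        rw [PySem.List.pyGetD_eq_getElem seg 0 (by omega) (by omega),
            PySem.List.pyGetD_eq_getElem pre 0 (by omega) (by omega)]
        simp only [hseg, List.getElem_take, List.getElem_drop]
        congr 1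
        omega
      rw [hget, if_neg hle]
      rw [PySem.List.slice_to _ (by omega)]
      have hsegeq : seg.take (PySem.Int.floordiv (r - l) 2).toNat
          = (pre.drop l.toNat).take (mid - 1 + 1 - l).toNat := by
        rw [hseg, List.take_take]
        congr 1
        omega
      rw [hsegeq]
      exact ih h0 (by omega)
  | case3 l r h =>
      intro h0 hr
      have hk : (r + 1 - l).toNat = 0 := by omega
      rw [hk, List.take_zero, pvFit.eq_def]
      simp

-- ===== VERDICT (by name: the statement is the Claim_ definition above) =====
theorem answerQueries_spec : Claim_equal_answerQueries := by
  intro nums queries _dom hne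
  have hsne : PySem.List.sorted nums (fun x => x) ≠ [] := fun h =>
    hne ((PySem.List.sorted_eq_nil_iff _ _ _).mp h)
  obtain ⟨n0, rest, hs⟩ := List.exists_cons_of_ne_nil hsne
  unfold Spec_answerQueries answerQueries answerQueries_alt
  simp only []
  rw [hs, pvPrefixA_eq, pvPrefixB_eq]
  rw [PySem.List.foldl_append_singleton_eq_map
        (fun q => pvBSearch (pvPf n0 rest) q 0 (((pvPf n0 rest).length : Int) - 1)) queries []]
  rw [List.nil_append]
  apply List.map_congr_left
  intro q _
  rw [pvBSearch_eq_fit (pvPf n0 rest) q 0 (((pvPf n0 rest).length : Int) - 1)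
        (le_refl 0) (by omega)]
  norm_num
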